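-- pv_equiv track=rewrite | github.com/necst/trilli | common/generator/generator.py | find_shift
-- ===== SOURCE A (Python) =====
-- def find_shift(sequence1, sequence2):
--   # Ensure sequences have the same length
--   assert len(sequence1) == len(sequence2), "Sequences must have the same length"
--
--   sequence1 = sequence1 * 3
--
--   for shift in range (0, len(sequence2)):
--     shifted = sequence1[shift:len(sequence2)+shift]
--     if shifted == sequence2:
--       return shift
--   return None
-- ===== SOURCE B (Python) =====
-- def find_shift(sequence1, sequence2):
--   # Ensure sequences have the same length
--   assert len(sequence1) == len(sequence2), "Sequences must have the same length"
--
--   n = len(sequence2)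
--   if n == 0:
--     return None
--
--   # KMP failure function of sequence2: fail[i] = longest proper border of sequence2[:i+1]
--   fail = [0]
--   k = 0
--   for c in sequence2[1:]:
--     while k and c != sequence2[k]:
--       k = fail[k - 1]
--     if c == sequence2[k]:
--       k += 1
--     fail.append(k)
--
--   # KMP scan for sequence2 over sequence1 doubled; first match end gives the shift
--   k = 0
--   for i, c in enumerate(sequence1 + sequence1):
--     while k and c != sequence2[k]:
--       k = fail[k - 1]
--     if c == sequence2[k]:
--       k += 1
--     if k == n:
--       return i - n + 1
--   return None
-- ===== Notes on version B (the rewrite author's own statement) =====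
-- stated objective: faster
-- what changed: Instead of trying every shift and comparing a freshly sliced length-n window of the tripled list, B runs Knuth-Morris-Pratt: it precomputes the failure function of sequence2 and scans sequence1 doubled once, returning the start of the first occurrence.
import Mathlib
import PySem

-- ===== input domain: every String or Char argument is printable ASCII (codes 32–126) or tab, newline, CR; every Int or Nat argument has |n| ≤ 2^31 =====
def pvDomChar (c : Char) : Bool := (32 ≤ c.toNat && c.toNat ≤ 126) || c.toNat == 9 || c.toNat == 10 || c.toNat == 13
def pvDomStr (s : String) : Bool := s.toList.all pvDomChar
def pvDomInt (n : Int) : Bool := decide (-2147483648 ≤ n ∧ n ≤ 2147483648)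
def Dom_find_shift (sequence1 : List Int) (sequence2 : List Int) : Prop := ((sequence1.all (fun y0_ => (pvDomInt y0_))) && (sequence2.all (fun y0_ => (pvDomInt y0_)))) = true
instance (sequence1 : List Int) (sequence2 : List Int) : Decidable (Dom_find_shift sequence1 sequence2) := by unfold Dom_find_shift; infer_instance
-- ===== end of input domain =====

-- B replaces A's try-every-shift-and-slice search by Knuth–Morris–Pratt search of sequence2
-- in sequence1 doubled (objective: faster).

-- ===== PORT A =====
def find_shift (sequence1 : List Int) (sequence2 : List Int) : Option Int :=
  if sequence1.length = sequence2.length then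
    -- sequence1 = sequence1 * 3
    let seq1 := PySem.List.pyRepeat sequence1 3
    -- for shift in range(0, len(sequence2)): if sequence1[shift:len(sequence2)+shift] == sequence2: return shift
    (PySem.List.pyRange 0 (PySem.List.len sequence2) 1).find? (fun shift =>
      PySem.List.slice seq1 (some shift) (some (PySem.List.len sequence2 + shift)) == sequence2)
  else none  -- assert fails: AssertionError (excluded by Pre_find_shift)

-- ===== PORT B =====
-- while k and c != sequence2[k]: k = fail[k-1]
-- ported with fuel = the entering k: each iteration strictly decreases k for the failure
-- lists B builds (fail[k-1] ≤ k-1), so the fuel is never exhausted, exactly like the Python loop.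
def pvWhile (p : List Int) (fail : List Nat) (c : Int) : Nat → Nat → Nat
  | 0, k => k
  | fuel+1, k =>
    if k ≠ 0 ∧ c ≠ p.getD k 0 then pvWhile p fail c fuel (fail.getD (k-1) 0) else k

-- fail = [0]; k = 0; for c in sequence2[1:]: <while>; if c == sequence2[k]: k += 1; fail.append(k)
-- (indices into sequence2 are always in range here, so getD is exact)
def buildFail (p : List Int) : List Nat :=
  ((p.drop 1).foldl (fun (st : List Nat × Nat) c =>
    let j := pvWhile p st.1 c st.2 st.2
    let k := if c == p.getD j 0 then j + 1 else j
    (st.1 ++ [k], k)) ([0], 0)).1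

-- k = 0; for i, c in enumerate(sequence1 + sequence1): <while>; if c == sequence2[k]: k += 1;
-- if k == n: return i - n + 1
def kmpScan (p : List Int) (fail : List Nat) : Nat → Nat → List Int → Option Int
  | _, _, [] => none
  | i, k, c :: rest =>
    let j := pvWhile p fail c k k
    let k' := if c == p.getD j 0 then j + 1 else j
    if k' = p.length then some ((i : Int) - (p.length : Int) + 1)
    else kmpScan p fail (i+1) k' rest

def find_shift_alt (sequence1 : List Int) (sequence2 : List Int) : Option Int :=
  if sequence1.length = sequence2.length then
    if sequence2.length = 0 then none
    else kmpScan sequence2 (buildFail sequence2) 0 0 (sequence1 ++ sequence1)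
  else none  -- assert fails: AssertionError (excluded by Pre_find_shift)

-- ===== PRECONDITION & SPEC =====
-- A raises AssertionError when the lengths differ; Pre_ admits exactly the inputs where A returns.
def Pre_find_shift (sequence1 : List Int) (sequence2 : List Int) : Prop :=
  sequence1.length = sequence2.length
instance (sequence1 : List Int) (sequence2 : List Int) : Decidable (Pre_find_shift sequence1 sequence2) := by unfold Pre_find_shift; infer_instance

def pvWitness_find_shift : List Int × List Int := ([1, 2, 3], [2, 3, 1])

def Spec_find_shift (sequence1 : List Int) (sequence2 : List Int) (out : Option Int) : Prop := out = find_shift_alt sequence1 sequence2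
instance (sequence1 : List Int) (sequence2 : List Int) (out : Option Int) : Decidable (Spec_find_shift sequence1 sequence2 out) := by unfold Spec_find_shift; infer_instance

-- ===== CLAIM (what is proved, stated in full; the proofs are below) =====
def Claim_equal_find_shift : Prop := ∀ (sequence1 : List Int) (sequence2 : List Int), Dom_find_shift sequence1 sequence2 → Pre_find_shift sequence1 sequence2 → Spec_find_shift sequence1 sequence2 (find_shift sequence1 sequence2)

-- ===== LEMMAS AND PROOFS =====

-- `pvInv p u cap k`: k is the largest m ≤ cap such that p.take m is a suffix of u.
def pvInv (p u : List Int) (cap k : Nat) : Prop :=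
  p.take k <:+ u ∧ k ≤ cap ∧ ∀ m, m ≤ cap → p.take m <:+ u → m ≤ k

-- `pvFailGood p fail j0`: entries of fail below j0 are the exact longest proper borders.
def pvFailGood (p : List Int) (fail : List Nat) (j0 : Nat) : Prop :=
  ∀ j, j < j0 → pvInv p (p.take (j+1)) j (fail.getD j 0)

-- two suffixes of the same list are comparable
lemma pv_suffix_of_suffix_le {α : Type} {x y u : List α}
    (hx : x <:+ u) (hy : y <:+ u) (h : x.length ≤ y.length) : x <:+ y := by
  rw [← List.reverse_prefix] at *
  exact List.prefix_of_prefix_length_le hx hy (by simpa using h)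

-- the while loop returns the largest candidate m ≤ k whose next character matches (or 0)
lemma pvWhile_correct (p : List Int) (fail : List Nat) (c : Int) (u : List Int) :
    ∀ fuel k, k ≤ fuel → pvFailGood p fail k → p.take k <:+ u →
    (pvWhile p fail c fuel k ≤ k ∧
     p.take (pvWhile p fail c fuel k) <:+ u ∧
     (pvWhile p fail c fuel k = 0 ∨ c = p.getD (pvWhile p fail c fuel k) 0) ∧
     ∀ m, m ≤ k → p.take m <:+ u → (m = 0 ∨ c = p.getD m 0) →
       m ≤ pvWhile p fail c fuel k) := by
  intro fuel
  induction fuel with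
  | zero =>
    intro k hk _ hsuf
    interval_cases k
    exact ⟨le_rfl, by simp [pvWhile], Or.inl rfl, fun m hm _ _ => hm⟩
  | succ fuel ih =>
    intro k hk hfail hsuf
    by_cases hcond : k ≠ 0 ∧ c ≠ p.getD k 0
    · have hres : pvWhile p fail c (fuel+1) k = pvWhile p fail c fuel (fail.getD (k-1) 0) := by
        simp only [pvWhile, if_pos hcond]
      have hk0 : k ≠ 0 := hcond.1
      have hklt : k - 1 < k := Nat.sub_lt (Nat.pos_of_ne_zero hk0) one_pos
      have hfk := hfail (k-1) hklt
      rw [Nat.sub_add_cancel (Nat.pos_of_ne_zero hk0)] at hfk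
      obtain ⟨hfsuf, hfle, hfmax⟩ := hfk
      set k' := fail.getD (k-1) 0 with hk'def
      have hk'le : k' ≤ k - 1 := hfle
      have hk'fuel : k' ≤ fuel := le_trans hk'le (by omega)
      have hfail' : pvFailGood p fail k' := fun j hj => hfail j (by omega)
      have hsuf' : p.take k' <:+ u := hfsuf.trans hsuf
      obtain ⟨ih1, ih2, ih3, ih4⟩ := ih k' hk'fuel hfail' hsuf'
      rw [hres]
      refine ⟨le_trans ih1 (by omega), ih2, ih3, ?_⟩
      intro m hm hmsuf hmc
      have hmne : m ≠ k := by
        rintro rfl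
        rcases hmc with rfl | hc
        · exact hcond.1 rfl
        · exact hcond.2 hc
      have hm' : m ≤ k - 1 := by omega
      have : p.take m <:+ p.take k :=
        pv_suffix_of_suffix_le hmsuf hsuf (by simp; omega)
      exact ih4 m (hfmax m hm' this) hmsuf hmc
    · have hres : pvWhile p fail c (fuel+1) k = k := by
        simp only [pvWhile, if_neg hcond]
      rw [hres]
      refine ⟨le_rfl, hsuf, ?_, fun m hm _ _ => hm⟩
      push_neg at hcond
      by_cases h0 : k = 0
      · exact Or.inl h0
      · exact Or.inr (hcond h0)

lemma pv_take_snoc (p : List Int) (m : Nat) (h : m < p.length) :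
    p.take (m+1) = p.take m ++ [p.getD m 0] := by
  rw [List.take_add_one, List.getD_eq_getElem p 0 h]
  simp [List.getElem?_eq_getElem h]

lemma pv_snoc_suffix_snoc {x u : List Int} {c : Int} (h : x <:+ u) :
    x ++ [c] <:+ u ++ [c] := by
  rw [← List.reverse_prefix] at *
  simpa [List.cons_prefix_cons] using h

lemma pv_suffix_snoc_decomp {y u : List Int} {c : Int} (h : y <:+ u ++ [c]) (hy : y ≠ []) :
    ∃ y', y = y' ++ [c] ∧ y' <:+ u := by
  rcases y.eq_nil_or_concat with rfl | ⟨y', d, rfl⟩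
  · exact absurd rfl hy
  · rw [List.concat_eq_append] at h ⊢
    have : d = c := by
      have := h.getLast (by simp)
      simpa [List.getLast_append] using this
    subst this
    refine ⟨y', rfl, ?_⟩
    rw [← List.reverse_prefix] at h ⊢
    simpa [List.cons_prefix_cons] using h

-- one KMP step preserves the invariant, raising the cap by one
lemma pvStep_correct (p : List Int) (fail : List Nat) (c : Int) (u : List Int)
    (cap k : Nat) (hcap : cap + 1 ≤ p.length)
    (hinv : pvInv p u cap k) (hfail : pvFailGood p fail k) :
    pvInv p (u ++ [c])
      (cap + 1)
      (if c == p.getD (pvWhile p fail c k k) 0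
        then pvWhile p fail c k k + 1 else pvWhile p fail c k k) := by
  obtain ⟨hsuf, hkcap, hmax⟩ := hinv
  obtain ⟨w1, w2, w3, w4⟩ := pvWhile_correct p fail c u k k le_rfl hfail hsuf
  set j := pvWhile p fail c k k with hj
  have hjlt : j < p.length := by omega
  by_cases hc : c = p.getD j 0
  · rw [if_pos (by simpa using hc)]
    refine ⟨?_, by omega, ?_⟩
    · rw [pv_take_snoc p j hjlt, ← hc]
      exact pv_snoc_suffix_snoc w2
    · intro m hm hmsuf
      rcases Nat.eq_zero_or_pos m with rfl | hmpos
      · omega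
      · obtain ⟨m', rfl⟩ : ∃ m', m = m' + 1 := ⟨m - 1, by omega⟩
        have hm'lt : m' < p.length := by omega
        rw [pv_take_snoc p m' hm'lt] at hmsuf
        obtain ⟨y', hy, hysuf⟩ := pv_suffix_snoc_decomp hmsuf (by simp)
        obtain ⟨hy1, hy2⟩ := List.append_inj' hy rfl
        subst hy1
        have hm'k : m' ≤ k := hmax m' (by omega) hysuf
        have : m' ≤ j := w4 m' hm'k hysuf (Or.inr (List.singleton_inj.mp hy2).symm)
        omega
  · rw [if_neg (by simpa using hc)]
    have hj0 : j = 0 := by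
      rcases w3 with h0 | h0
      · exact h0
      · exact absurd h0 hc
    refine ⟨by simp [hj0], by omega, ?_⟩
    intro m hm hmsuf
    rcases Nat.eq_zero_or_pos m with rfl | hmpos
    · omega
    · obtain ⟨m', rfl⟩ : ∃ m', m = m' + 1 := ⟨m - 1, by omega⟩
      have hm'lt : m' < p.length := by omega
      rw [pv_take_snoc p m' hm'lt] at hmsuf
      obtain ⟨y', hy, hysuf⟩ := pv_suffix_snoc_decomp hmsuf (by simp)
      obtain ⟨hy1, hy2⟩ := List.append_inj' hy rfl
      subst hy1
      have hm'k : m' ≤ k := hmax m' (by omega) hysuf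
      have hm'j : m' ≤ j := w4 m' hm'k hysuf (Or.inr (List.singleton_inj.mp hy2).symm)
      rw [hj0] at hm'j
      interval_cases m'
      exact absurd (by rw [hj0]; exact (List.singleton_inj.mp hy2).symm) hc

lemma pv_getD_append_left (l l' : List Nat) (n : Nat) (h : n < l.length) :
    (l ++ l').getD n 0 = l.getD n 0 := by
  simp [List.getD_eq_getElem?_getD, List.getElem?_append_left h]

lemma pv_getD_append_last (l : List Nat) (a : Nat) :
    (l ++ [a]).getD l.length 0 = a := by
  simp [List.getD_eq_getElem?_getD]

-- fold invariant: after i steps the failure list has i+1 exact entries and k is the last one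
lemma buildFail_inv (p : List Int) :
    ∀ d, d + 1 ≤ p.length →
    ((((p.drop 1).take d).foldl (fun (st : List Nat × Nat) c =>
        let j := pvWhile p st.1 c st.2 st.2
        let k := if c == p.getD j 0 then j + 1 else j
        (st.1 ++ [k], k)) ([0], 0)).1.length = d + 1) ∧
    pvFailGood p (((p.drop 1).take d).foldl (fun (st : List Nat × Nat) c =>
        let j := pvWhile p st.1 c st.2 st.2
        let k := if c == p.getD j 0 then j + 1 else j
        (st.1 ++ [k], k)) ([0], 0)).1 (d + 1) ∧
    (((p.drop 1).take d).foldl (fun (st : List Nat × Nat) c =>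
        let j := pvWhile p st.1 c st.2 st.2
        let k := if c == p.getD j 0 then j + 1 else j
        (st.1 ++ [k], k)) ([0], 0)).2 =
      (((p.drop 1).take d).foldl (fun (st : List Nat × Nat) c =>
        let j := pvWhile p st.1 c st.2 st.2
        let k := if c == p.getD j 0 then j + 1 else j
        (st.1 ++ [k], k)) ([0], 0)).1.getD d 0 := by
  intro d
  induction d with
  | zero =>
    intro _
    refine ⟨by simp, ?_, by simp⟩
    intro j hj
    interval_cases j
    exact ⟨by simp, le_rfl, fun m hm _ => by omega⟩
  | succ d ih =>
    intro hd
    obtain ⟨ihlen, ihgood, ihsnd⟩ := ih (by omega)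
    have hdlt : d < (p.drop 1).length := by simp; omega
    have htake : (p.drop 1).take (d+1) = (p.drop 1).take d ++ [(p.drop 1).getD d 0] :=
      pv_take_snoc _ d hdlt
    have hget : (p.drop 1).getD d 0 = p.getD (d+1) 0 := by
      rw [List.getD_eq_getElem _ 0 hdlt, List.getD_eq_getElem _ 0 (by omega)]
      simp
    rw [htake, List.foldl_append, hget]
    set st := (((p.drop 1).take d).foldl (fun (st : List Nat × Nat) c =>
        let j := pvWhile p st.1 c st.2 st.2
        let k := if c == p.getD j 0 then j + 1 else j
        (st.1 ++ [k], k)) ([0], 0)) with hst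
    simp only [List.foldl_cons, List.foldl_nil]
    -- the invariant for the step
    have hinv : pvInv p (p.take (d+1)) d st.2 := by
      rw [ihsnd]
      exact ihgood d (by omega)
    have hfailst : pvFailGood p st.1 st.2 := by
      intro j hj
      exact ihgood j (by have := hinv.2.1; omega)
    have hstep := pvStep_correct p st.1 (p.getD (d+1) 0) (p.take (d+1)) d st.2
      (by omega) hinv hfailst
    rw [← pv_take_snoc p (d+1) (by omega)] at hstep
    refine ⟨by simp [ihlen], ?_, ?_⟩
    · intro j hj
      rcases Nat.lt_or_ge j (d+1) with hlt | hge
      · have := ihgood j hlt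
        rwa [pv_getD_append_left _ _ j (by omega)]
      · have hj' : j = d + 1 := by omega
        subst hj'
        have hlast : ∀ a : Nat, (st.1 ++ [a]).getD (d+1) 0 = a := fun a => by
          rw [← ihlen]; exact pv_getD_append_last _ _
        rw [hlast]
        exact hstep
    · have hlast : ∀ a : Nat, (st.1 ++ [a]).getD (d+1) 0 = a := fun a => by
        rw [← ihlen]; exact pv_getD_append_last _ _
      rw [hlast]

-- the failure list B builds is exact
lemma buildFail_correct (p : List Int) (hp : p ≠ []) :
    pvFailGood p (buildFail p) p.length := by
  have hlen : 1 ≤ p.length := by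
    cases p
    · exact absurd rfl hp
    · simp
  have h := (buildFail_inv p (p.length - 1) (by omega)).2.1
  rw [show (p.drop 1).take (p.length - 1) = p.drop 1 by
        rw [List.take_of_length_le (by simp)]] at h
  rw [show p.length - 1 + 1 = p.length by omega] at h
  exact h

-- the scan returns the first end position of an occurrence, as i - n + 1
lemma kmpScan_correct (p : List Int) (fail : List Nat) (hp : p ≠ [])
    (hfail : pvFailGood p fail p.length) :
    ∀ (rest u : List Int) (k : Nat), pvInv p u (p.length - 1) k →
    kmpScan p fail u.length k rest =
      ((List.range rest.length).find? (fun d => decide (p <:+ u ++ rest.take (d+1)))).map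
        (fun d => ((u.length + d : Nat) : Int) - (p.length : Int) + 1) := by
  have hlen : 1 ≤ p.length := by
    cases p with
    | nil => exact absurd rfl hp
    | cons a t => simp
  intro rest
  induction rest with
  | nil => intro u k _; simp [kmpScan]
  | cons c rest ih =>
    intro u k hinv
    have hfailk : pvFailGood p fail k := fun j hj => hfail j (by have := hinv.2.1; omega)
    have hstep := pvStep_correct p fail c u (p.length - 1) k (by omega) hinv hfailk
    rw [show p.length - 1 + 1 = p.length by omega] at hstep
    set k' := (if c == p.getD (pvWhile p fail c k k) 0
        then pvWhile p fail c k k + 1 else pvWhile p fail c k k) with hk'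
    have hscan : kmpScan p fail u.length k (c :: rest) =
        (if k' = p.length then some ((u.length : Int) - (p.length : Int) + 1)
         else kmpScan p fail (u.length+1) k' rest) := by
      simp only [kmpScan, hk']
    rw [hscan]
    by_cases hfull : k' = p.length
    · rw [if_pos hfull]
      have hocc : p <:+ u ++ [c] := by
        have := hstep.1
        rwa [hfull, List.take_length] at this
      have : (List.range (c :: rest).length).find?
          (fun d => decide (p <:+ u ++ (c :: rest).take (d+1))) = some 0 := by
        rw [List.length_cons, List.range_succ_eq_map, List.find?_cons]
        simp [hocc]
      rw [this]
      simp
    · rw [if_neg hfull]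
      have hnocc : ¬ p <:+ u ++ [c] := by
        intro hocc
        exact hfull (le_antisymm hstep.2.1
          (hstep.2.2 p.length le_rfl (by rwa [List.take_length])))
      have hk'le : k' ≤ p.length - 1 := by have := hstep.2.1; omega
      have hinv' : pvInv p (u ++ [c]) (p.length - 1) k' :=
        ⟨hstep.1, hk'le, fun m hm hs => hstep.2.2 m (by omega) hs⟩
      have ihres := ih (u ++ [c]) k' hinv'
      rw [show (u ++ [c]).length = u.length + 1 by simp] at ihres
      rw [ihres]
      rw [List.length_cons, List.range_succ_eq_map, List.find?_cons]
      have h0 : (decide (p <:+ u ++ (c :: rest).take (0+1))) = false := by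
        exact decide_eq_false (by simpa using hnocc)
      rw [h0, List.find?_map]
      rw [Option.map_map]
      rcases hfind : (List.range rest.length).find?
          (fun d => decide (p <:+ (u ++ [c]) ++ rest.take (d+1))) with _ | d
      · have : (List.range rest.length).find?
            ((fun d => decide (p <:+ u ++ (c :: rest).take (d+1))) ∘ Nat.succ) = none := by
          rw [List.find?_eq_none] at hfind ⊢
          intro x hx
          have := hfind x hx
          simpa [List.take_cons, List.append_assoc] using this
        rw [this]
        rfl
      · have : (List.range rest.length).find?
            ((fun d => decide (p <:+ u ++ (c :: rest).take (d+1))) ∘ Nat.succ)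
            = some d := by
          rw [List.find?_eq_some_iff_append] at hfind ⊢
          obtain ⟨hpd, l1, l2, hsplit, hprev⟩ := hfind
          refine ⟨by simpa [List.take_cons, List.append_assoc] using hpd, l1, l2, hsplit, ?_⟩
          intro x hx
          have := hprev x hx
          simpa [List.take_cons, List.append_assoc] using this
        rw [this]
        simp only [Option.map_some, Function.comp_apply]
        congr 1
        push_cast
        ring

lemma pv_find?_congr_mem {α : Type} {l : List α} {p q : α → Bool}
    (h : ∀ a ∈ l, p a = q a) : l.find? p = l.find? q := by
  induction l with
  | nil => rfl
  | cons a t ih =>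
    simp only [List.find?_cons]
    rw [h a (by simp)]
    cases hqa : q a
    · exact ih (fun b hb => h b (by simp [hb]))
    · rfl

-- an occurrence ending at e+1 is an occurrence starting at e+1-n
lemma pv_end_iff (t p : List Int) (e : Nat) (he : e + 1 ≤ t.length) :
    (p <:+ t.take (e+1)) ↔
      (p.length ≤ e + 1 ∧ (t.drop (e+1-p.length)).take p.length = p) := by
  constructor
  · intro h
    have hlen : p.length ≤ e + 1 := by
      have := h.length_le
      simpa [Nat.min_eq_left he] using this
    refine ⟨hlen, ?_⟩
    have := List.suffix_iff_eq_drop.mp h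
    rw [List.length_take, Nat.min_eq_left he, List.drop_take] at this
    rw [show e + 1 - (e + 1 - p.length) = p.length by omega] at this
    exact this.symm
  · rintro ⟨hlen, heq⟩
    rw [List.suffix_iff_eq_drop, List.length_take, Nat.min_eq_left he, List.drop_take,
      show e + 1 - (e + 1 - p.length) = p.length by omega]
    exact heq.symm

-- first match end over the doubled list = first matching shift of the brute-force scan
lemma pv_glue (s1 p : List Int) (h : s1.length = p.length) (hp : p ≠ []) :
    ((List.range ((s1++s1).length)).find?
        (fun e => decide (p <:+ (s1++s1).take (e+1)))).map
      (fun e => ((e : Nat) : Int) - (p.length : Int) + 1)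
    = ((List.range p.length).find?
        (fun s => ((s1++s1).drop s).take p.length == p)).map
      (fun s => ((s : Nat) : Int)) := by
  have hn : 1 ≤ p.length := by
    cases p with
    | nil => exact absurd rfl hp
    | cons a t => simp
  set n := p.length with hnn
  set t := s1 ++ s1 with ht
  have htlen : t.length = n + n := by simp [ht, h]
  set q : Nat → Bool := fun s => (t.drop s).take n == p with hq
  -- split the range of end positions: below n-1 no occurrence fits
  have hsplit : List.range (n + n) = List.range (n-1) ++ (List.range (n+1)).map ((n-1) + ·) := by
    rw [← List.range_add, show n - 1 + (n + 1) = n + n by omega]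
  have hfirst : (List.range (n-1)).find? (fun e => decide (p <:+ t.take (e+1))) = none := by
    rw [List.find?_eq_none]
    intro e he
    rw [List.mem_range] at he
    simp only [decide_eq_true_eq]
    intro hocc
    have := ((pv_end_iff t p e (by omega)).mp hocc).1
    omega
  rw [htlen, hsplit, List.find?_append, hfirst, Option.none_or, List.find?_map, Option.map_map]
  have hpoint : ∀ d ∈ List.range (n+1),
      ((fun e => decide (p <:+ t.take (e+1))) ∘ ((n-1) + ·)) d = q d := by
    intro d hd
    rw [List.mem_range] at hd
    simp only [Function.comp_apply]
    rw [show n - 1 + d + 1 = n + d by omega]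
    have := pv_end_iff t p (n + d - 1) (by omega)
    rw [show n + d - 1 + 1 = n + d by omega] at this
    rw [hq, Bool.eq_iff_iff]
    simp only [this, beq_iff_eq, decide_eq_true_eq]
    rw [← hnn]
    constructor
    · rintro ⟨-, h2⟩
      rwa [show n + d - n = d by omega] at h2
    · intro h2
      exact ⟨by omega, by rwa [show n + d - n = d by omega]⟩
  rw [pv_find?_congr_mem hpoint]
  rw [List.range_succ, List.find?_append]
  rcases hfind : (List.range n).find? q with _ | s
  · -- no shift works; then s1 ≠ p, so shift n fails too
    have hq0 : q 0 = false := by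
      have h0mem : 0 ∈ List.range n := List.mem_range.mpr (by omega)
      simpa using List.find?_eq_none.mp hfind 0 h0mem
    have hs1p : ¬ (s1 = p) := by
      rw [hq] at hq0
      simp only [List.drop_zero] at hq0
      rw [show t.take n = s1 by rw [ht, ← h]; exact List.take_left ..] at hq0
      simpa using hq0
    have hqn : q n = false := by
      rw [hq]
      simp only [beq_eq_false_iff_ne, ne_eq]
      rw [show t.drop n = s1 by rw [ht, ← h]; exact List.drop_left ..,
        show s1.take n = s1 by rw [← h]; exact List.take_length]
      exact hs1p
    simp [hqn]
  · simp only [Option.some_or, Option.map_some, Function.comp_apply]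
    congr 1
    omega

lemma pv_main : ∀ (s1 s2 : List Int), s1.length = s2.length →
    find_shift s1 s2 = find_shift_alt s1 s2 := by
  intro s1 s2 hpre
  unfold find_shift find_shift_alt
  rw [if_pos hpre, if_pos hpre]
  rcases Nat.eq_zero_or_pos s2.length with h0 | hpos
  · have hs2 : s2 = [] := List.length_eq_zero_iff.mp h0
    have hs1 : s1 = [] := List.length_eq_zero_iff.mp (by omega)
    subst hs1; subst hs2
    decide
  · have hp : s2 ≠ [] := by intro h; subst h; simp at hpos
    rw [if_neg (by omega)]
    -- B side via KMP correctness
    have hinv0 : pvInv s2 [] (s2.length - 1) 0 :=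
      ⟨by simp, by omega, fun m hm hsuf => by
        have := List.suffix_nil.mp hsuf
        rcases List.take_eq_nil_iff.mp this with h | h
        · omega
        · exact absurd h hp⟩
    have hB := kmpScan_correct s2 (buildFail s2) hp (buildFail_correct s2 hp)
      (s1 ++ s1) [] 0 hinv0
    simp only [List.length_nil, List.nil_append, Nat.zero_add] at hB
    rw [hB]
    -- A side: pyRange and slices to plain lists
    rw [show PySem.List.len s2 = ((s2.length : Int)) from PySem.List.len_eq s2,
      PySem.List.pyRange_zero_nat, List.find?_map]
    have hrep : PySem.List.pyRepeat s1 3 = s1 ++ s1 ++ s1 := by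
      simp [PySem.List.pyRepeat]
    have hA : ∀ k ∈ List.range s2.length,
        ((fun shift => PySem.List.slice (PySem.List.pyRepeat s1 3) (some shift)
            (some ((s2.length : Int) + shift)) == s2) ∘ (fun k : Nat => (k : Int))) k
        = (fun s => ((s1++s1).drop s).take s2.length == s2) k := by
      intro k hk
      rw [List.mem_range] at hk
      simp only [Function.comp_apply]
      rw [hrep, show (s2.length : Int) + (k : Int) = (k : Int) + (s2.length : Int) from add_comm _ _,
        PySem.List.slice_natCast_add]
      congr 1
      rw [List.drop_append_of_le_length (by simp; omega),
        List.take_append_of_le_length (by simp; omega)]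
    rw [pv_find?_congr_mem hA]
    -- glue
    have hg := pv_glue s1 s2 hpre hp
    rw [← hg]
    rfl

-- ===== VERDICT (by name: the statement is the Claim_ definition above) =====
theorem find_shift_spec : Claim_equal_find_shift := by
  intro s1 s2 _ hpre
  exact pv_main s1 s2 hpre
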